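-- pv_equiv track=rewrite | github.com/jzone3/Matrix-Cipher | codeBreaker.py | two_column
-- ===== SOURCE A (Python) =====
-- def two_column(matrix):
-- 	matrix = list(matrix)
-- 	if len(matrix) % 2 != 0:
-- 		matrix.append(0)
--
-- 	m1 = []
-- 	m2 = []
-- 	for i in range(0, len(matrix)):
-- 		if i % 2 == 0:
-- 			m1.append(matrix[i])
-- 		else:
-- 			m2.append(matrix[i])
--
-- 	to_return = []
-- 	for i in range(0, len(m1)):
-- 		if m2[i]:
-- 			to_return.append([m1[i], m2[i]])
-- 		else:
-- 			to_return.append([m1[i], 0])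
-- 	return to_return
-- ===== SOURCE B (Python) =====
-- def two_column(matrix):
--     it = iter(matrix)
--     return [[a, next(it, 0)] for a in it]
-- ===== Notes on version B (the rewrite author's own statement) =====
-- stated objective: simpler
-- what changed: Replaces the copy-and-pad, even/odd split loops and merge loop by a single pass that consumes the input pairwise with an iterator, defaulting the missing last partner to 0.
import Mathlib
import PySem

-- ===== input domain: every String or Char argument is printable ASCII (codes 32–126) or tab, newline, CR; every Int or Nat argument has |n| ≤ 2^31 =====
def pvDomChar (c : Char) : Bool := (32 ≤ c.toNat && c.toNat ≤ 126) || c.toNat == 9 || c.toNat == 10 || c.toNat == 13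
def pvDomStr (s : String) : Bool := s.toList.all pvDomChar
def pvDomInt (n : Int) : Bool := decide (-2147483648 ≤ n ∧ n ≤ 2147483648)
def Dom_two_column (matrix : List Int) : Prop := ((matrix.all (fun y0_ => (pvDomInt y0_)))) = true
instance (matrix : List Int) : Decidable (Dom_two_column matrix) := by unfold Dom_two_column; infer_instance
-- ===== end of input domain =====

-- B replaces A's pad/split/merge loops by one pairwise pass over the input; objective: simpler.

-- ===== PORT A =====
-- Helper: the body of A after the padding step (the split loops and the merge loop).
def twoColumnCore (m : List Int) : List (List Int) :=
  let split := (PySem.List.pyRange 0 (m.length : Int) 1).foldl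
      (fun (p : List Int × List Int) i =>
        if i % 2 = 0 then (p.1 ++ [PySem.List.pyGetD m i 0], p.2)
        else (p.1, p.2 ++ [PySem.List.pyGetD m i 0])) ([], [])
  (PySem.List.pyRange 0 (split.1.length : Int) 1).foldl
      (fun acc i =>
        if PySem.List.pyGetD split.2 i 0 ≠ 0 then
          acc ++ [[PySem.List.pyGetD split.1 i 0, PySem.List.pyGetD split.2 i 0]]
        else acc ++ [[PySem.List.pyGetD split.1 i 0, 0]]) []

def two_column (matrix : List Int) : List (List Int) :=
  twoColumnCore (if (matrix.length : Int) % 2 ≠ 0 then matrix ++ [0] else matrix)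

-- ===== PORT B =====
-- pairwise iterator consumption: take two elements per step, default the missing partner to 0
def two_column_alt : List Int → List (List Int)
  | [] => []
  | [a] => [[a, 0]]
  | a :: b :: rest => [a, b] :: two_column_alt rest

-- ===== PRECONDITION & SPEC =====
def Spec_two_column (matrix : List Int) (out : List (List Int)) : Prop := out = two_column_alt matrix
instance (matrix : List Int) (out : List (List Int)) : Decidable (Spec_two_column matrix out) := by unfold Spec_two_column; infer_instance

-- ===== CLAIM (what is proved, stated in full; the proofs are below) =====
def Claim_equal_two_column : Prop := ∀ (matrix : List Int), Dom_two_column matrix → Spec_two_column matrix (two_column matrix)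

-- ===== LEMMAS AND PROOFS =====

-- proof-side name for A's split loops
def splitF (m : List Int) : List Int × List Int :=
  (PySem.List.pyRange 0 (m.length : Int) 1).foldl
    (fun (p : List Int × List Int) i =>
      if i % 2 = 0 then (p.1 ++ [PySem.List.pyGetD m i 0], p.2)
      else (p.1, p.2 ++ [PySem.List.pyGetD m i 0])) ([], [])

theorem core_def (m : List Int) : twoColumnCore m =
    (PySem.List.pyRange 0 ((splitF m).1.length : Int) 1).foldl
      (fun acc i =>
        if PySem.List.pyGetD (splitF m).2 i 0 ≠ 0 then
          acc ++ [[PySem.List.pyGetD (splitF m).1 i 0, PySem.List.pyGetD (splitF m).2 i 0]]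
        else acc ++ [[PySem.List.pyGetD (splitF m).1 i 0, 0]]) [] := rfl

-- B appends one pair when two elements are appended to an even-length list
theorem alt_append_pair : ∀ (n : ℕ) (ys : List Int), ys.length = 2 * n →
    ∀ a b : Int, two_column_alt (ys ++ [a, b]) = two_column_alt ys ++ [[a, b]] := by
  intro n
  induction n with
  | zero => intro ys h a b; simp at h; subst h; simp [two_column_alt]
  | succ k ih =>
    intro ys h a b
    match ys with
    | x :: y :: rest =>
      simp only [List.cons_append, two_column_alt]
      rw [ih rest (by simp [Nat.mul_succ] at h ⊢; omega) a b]
    | [] => simp at h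
    | [x] => simp at h; omega

-- padding an odd-length list with a trailing 0 does not change B's output
theorem alt_pad (m : List Int) (h : m.length % 2 = 1) :
    two_column_alt (m ++ [0]) = two_column_alt m := by
  induction m using two_column_alt.induct with
  | case1 => simp at h
  | case2 a => simp [two_column_alt]
  | case3 a b rest ih =>
    simp only [List.cons_append, two_column_alt]
    rw [ih (by simp at h; omega)]

-- appending two elements to an even-length list appends one element to each split half
theorem splitF_append (ys : List Int) (a b : Int) (heven : ys.length % 2 = 0) :
    splitF (ys ++ [a, b]) = ((splitF ys).1 ++ [a], (splitF ys).2 ++ [b]) := by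
  have hlen : ((ys ++ [a, b]).length : Int) = ((ys.length : Int) + 1) + 1 := by
    simp; ring
  have hagree : ∀ i ∈ PySem.List.pyRange 0 (ys.length : Int), ∀ (acc : List Int × List Int),
      (fun (p : List Int × List Int) i =>
        if i % 2 = 0 then (p.1 ++ [PySem.List.pyGetD (ys ++ [a, b]) i 0], p.2)
        else (p.1, p.2 ++ [PySem.List.pyGetD (ys ++ [a, b]) i 0])) acc i
      = (fun (p : List Int × List Int) i =>
        if i % 2 = 0 then (p.1 ++ [PySem.List.pyGetD ys i 0], p.2)
        else (p.1, p.2 ++ [PySem.List.pyGetD ys i 0])) acc i := by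
    intro i hi acc
    rw [PySem.List.mem_pyRange_one] at hi
    have hget : PySem.List.pyGetD (ys ++ [a, b]) i 0 = PySem.List.pyGetD ys i 0 := by
      rw [PySem.List.pyGetD_eq_getElem _ _ hi.1 (by simp; omega),
          PySem.List.pyGetD_eq_getElem _ _ hi.1 (by exact_mod_cast hi.2),
          List.getElem_append_left (by omega)]
    simp only [hget]
  have hE : ((ys.length : Int)) % 2 = 0 := by omega
  have hO : ¬ ((ys.length : Int) + 1) % 2 = 0 := by omega
  have hga : PySem.List.pyGetD (ys ++ [a, b]) (ys.length : Int) 0 = a := by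
    rw [PySem.List.pyGetD_eq_getElem _ _ (by positivity) (by simp)]
    simp
  have hgb : PySem.List.pyGetD (ys ++ [a, b]) ((ys.length : Int) + 1) 0 = b := by
    rw [PySem.List.pyGetD_eq_getElem _ _ (by positivity) (by simp)]
    have ht : ((ys.length : Int) + 1).toNat = ys.length + 1 := by omega
    simp [ht]
  simp only [splitF, hlen]
  rw [PySem.List.pyRange_one_succ_right (by omega),
      PySem.List.pyRange_one_succ_right (by omega),
      List.foldl_append, List.foldl_append,
      PySem.List.foldl_congr_mem _ _ _ _ (fun acc i hi => hagree i hi acc)]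
  simp only [List.foldl_cons, List.foldl_nil]
  rw [if_pos hE, if_neg hO]
  simp [hga, hgb]

-- main invariant: on an even-length list, A's split loops produce two halves of
-- length n and A's merge loop produces exactly B's pairwise pass
theorem core_even : ∀ (n : ℕ) (m : List Int), m.length = 2 * n →
    (splitF m).1.length = n ∧ (splitF m).2.length = n ∧
    twoColumnCore m = two_column_alt m := by
  intro n
  induction n with
  | zero =>
    intro m h
    simp at h; subst h
    refine ⟨?_, ?_, ?_⟩ <;>
      simp [splitF, twoColumnCore, two_column_alt, PySem.List.pyRange_one_eq_nil]
  | succ k ih =>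
    intro m h
    obtain ⟨ys, a, b, rfl⟩ : ∃ ys a b, m = ys ++ [a, b] := by
      rcases m.eq_nil_or_concat with rfl | ⟨m', b, rfl⟩
      · simp at h
      rcases m'.eq_nil_or_concat with rfl | ⟨ys, a, rfl⟩
      · simp at h; omega
      · exact ⟨ys, a, b, by simp⟩
    have hys : ys.length = 2 * k := by simp at h; omega
    obtain ⟨hl1, hl2, hcore⟩ := ih ys hys
    have hsp := splitF_append ys a b (by omega)
    refine ⟨by simp [hsp, hl1], by simp [hsp, hl2], ?_⟩
    rw [core_def, hsp, alt_append_pair k ys hys a b, ← hcore]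
    have hmlen : (((splitF ys).1 ++ [a]).length : Int) = ((splitF ys).1.length : Int) + 1 := by
      simp
    have hagree2 : ∀ i ∈ PySem.List.pyRange 0 ((splitF ys).1.length : Int),
        ∀ (acc : List (List Int)),
        (fun acc i =>
          if PySem.List.pyGetD ((splitF ys).2 ++ [b]) i 0 ≠ 0 then
            acc ++ [[PySem.List.pyGetD ((splitF ys).1 ++ [a]) i 0,
                     PySem.List.pyGetD ((splitF ys).2 ++ [b]) i 0]]
          else acc ++ [[PySem.List.pyGetD ((splitF ys).1 ++ [a]) i 0, 0]]) acc i
        = (fun acc i =>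
          if PySem.List.pyGetD (splitF ys).2 i 0 ≠ 0 then
            acc ++ [[PySem.List.pyGetD (splitF ys).1 i 0, PySem.List.pyGetD (splitF ys).2 i 0]]
          else acc ++ [[PySem.List.pyGetD (splitF ys).1 i 0, 0]]) acc i := by
      intro i hi acc
      rw [PySem.List.mem_pyRange_one] at hi
      have h1 : PySem.List.pyGetD ((splitF ys).1 ++ [a]) i 0 = PySem.List.pyGetD (splitF ys).1 i 0 := by
        rw [PySem.List.pyGetD_eq_getElem _ _ hi.1 (by simp; omega),
            PySem.List.pyGetD_eq_getElem _ _ hi.1 (by exact_mod_cast hi.2),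
            List.getElem_append_left (by omega)]
      have h2 : PySem.List.pyGetD ((splitF ys).2 ++ [b]) i 0 = PySem.List.pyGetD (splitF ys).2 i 0 := by
        rw [PySem.List.pyGetD_eq_getElem _ _ hi.1 (by simp; omega),
            PySem.List.pyGetD_eq_getElem _ _ hi.1 (by omega),
            List.getElem_append_left (by omega)]
      simp only [h1, h2]
    have hga : PySem.List.pyGetD ((splitF ys).1 ++ [a]) ((splitF ys).1.length : Int) 0 = a := by
      rw [PySem.List.pyGetD_eq_getElem _ _ (by positivity) (by simp)]
      simp
    have hgb : PySem.List.pyGetD ((splitF ys).2 ++ [b]) ((splitF ys).1.length : Int) 0 = b := by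
      rw [PySem.List.pyGetD_eq_getElem _ _ (by positivity) (by simp; omega)]
      have ht : (((splitF ys).1.length : Int)).toNat = (splitF ys).2.length := by omega
      simp [ht]
    rw [hmlen, PySem.List.pyRange_one_succ_right (by positivity), List.foldl_append,
        PySem.List.foldl_congr_mem _ _ _ _ (fun acc i hi => hagree2 i hi acc),
        ← core_def ys, hcore]
    simp only [List.foldl_cons, List.foldl_nil, hga, hgb]
    by_cases hb : b = 0
    · subst hb; simp
    · simp [hb]

theorem two_column_eq (matrix : List Int) : two_column matrix = two_column_alt matrix := by
  unfold two_column
  by_cases h : (matrix.length : Int) % 2 ≠ 0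
  · rw [if_pos h]
    have hodd : matrix.length % 2 = 1 := by omega
    have hlen : (matrix ++ [0]).length = 2 * ((matrix.length + 1) / 2) := by simp; omega
    rw [(core_even _ _ hlen).2.2, alt_pad matrix hodd]
  · rw [if_neg h]
    have hlen : matrix.length = 2 * (matrix.length / 2) := by omega
    exact (core_even _ _ hlen).2.2

-- ===== VERDICT (by name: the statement is the Claim_ definition above) =====
theorem two_column_spec : Claim_equal_two_column := by
  intro matrix _
  exact two_column_eq matrix
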